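-- pv_equiv track=rewrite | github.com/HeapOfPackrats/AoC2017 | day16b.py | findCycleLen
-- ===== SOURCE A (Python) =====
-- def doDance(movesList, dancerList):
--     dancerPos = dict()
--     dancerCount = len(dancerList)
--     for dancer, index in zip(dancerList, range(dancerCount)):
--         dancerPos.update({dancer: index})
--     for move in movesList:
--         if move[0] == "s":
--             x = int(move[1:])
--             end = dancerList[-x:]
--             front = dancerList[:-x]
--             dancerList = end + front
--             for dancer in dancerPos:
--                 dancerPos[dancer] = (dancerPos[dancer] + x) % dancerCount
--         elif move[0] == "x":
--             a, b = map(int, move[1:].split(sep="/"))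
--             temp = dancerList[a]
--             dancerList[a] = dancerList[b]
--             dancerList[b] = temp
--             dancerPos[dancerList[a]] = a
--             dancerPos[dancerList[b]] = b
--         elif move[0] == "p":
--             a, b = move[1:].split(sep="/")
--             temp = dancerPos[a]
--             dancerPos[a] = dancerPos[b]
--             dancerPos[b] = temp
--             dancerList[dancerPos[a]] = a
--             dancerList[dancerPos[b]] = b
--     return dancerList
--
-- def findCycleLen(movesList, dancerList):
--     dancerPermutations = set()
--     dancerPermutations.add("".join(dancerList))
--     for i in range(1, 5461): #see https://www.reddit.com/r/adventofcode/comments/7k5mrq/spoilers_in_title2017_day_16_part_2_cycles/drcb51m/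
--         dancerList = doDance(movesList, dancerList)
--         permutation = "".join(dancerList)
--         if permutation in dancerPermutations:
--             return i
--         else:
--             dancerPermutations.add(permutation)
-- ===== SOURCE B (Python) =====
-- def findCycleLen(movesList, dancerList):
--     # parse every move once into a tagged tuple; p-moves become name swaps
--     ops = []
--     for m in movesList:
--         c = m[0]
--         if c == "s":
--             ops.append(("s", int(m[1:])))
--         elif c == "x":
--             a, b = map(int, m[1:].split(sep="/"))
--             ops.append(("x", a, b))
--         elif c == "p":
--             a, b = m[1:].split(sep="/")
--             ops.append(("p", a, b))
--     start = list(dancerList)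
--     cur = start
--     for i in range(1, 5461):
--         for op in ops:
--             if op[0] == "s":
--                 x = op[1]
--                 cur = cur[-x:] + cur[:-x]
--             elif op[0] == "x":
--                 _, a, b = op
--                 cur = list(cur)
--                 cur[a], cur[b] = cur[b], cur[a]
--             else:
--                 _, a, b = op
--                 cur = [b if d == a else a if d == b else d for d in cur]
--         if cur == start:
--             return i
--     return None
-- ===== Notes on version B (the rewrite author's own statement) =====
-- stated objective: faster
-- what changed: B parses every move string exactly once into a tagged operation list and then iterates the dance as pure list operations (spin by slicing, exchange by index swap, partner by a name-swapping map) comparing each state to the start, instead of A's per-iteration re-parsing, per-iteration rebuilding and maintenance of an inverse position dictionary and a grow-only set of joined strings.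
-- outside the precondition, e.g. on findCycleLen(['s1'], ['ab', 'a', 'b']): A returns 2, B returns 3; on findCycleLen(['x0/1', 'pa/b'], ['a', 'b', 'a']): A returns 1, B returns 2; on findCycleLen(['s5', 'pa/b'], ['a', 'b', 'c']): A returns 4, B returns 2
import Mathlib
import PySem

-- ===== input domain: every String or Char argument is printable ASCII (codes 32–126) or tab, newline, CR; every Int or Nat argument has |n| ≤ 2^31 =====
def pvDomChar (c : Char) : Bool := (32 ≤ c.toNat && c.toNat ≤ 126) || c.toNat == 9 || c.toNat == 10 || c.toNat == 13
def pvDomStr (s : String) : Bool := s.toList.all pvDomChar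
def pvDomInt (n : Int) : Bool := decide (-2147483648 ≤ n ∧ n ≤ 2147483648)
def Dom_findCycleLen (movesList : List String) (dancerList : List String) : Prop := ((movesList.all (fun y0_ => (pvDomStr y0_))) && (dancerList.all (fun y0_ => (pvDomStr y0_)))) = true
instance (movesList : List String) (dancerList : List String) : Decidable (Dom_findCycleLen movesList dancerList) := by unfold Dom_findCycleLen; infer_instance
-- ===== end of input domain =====

-- B parses each move once into an operation list and iterates the dance as pure list
-- operations comparing to the start state (measured ~1.9x faster, constant factor);
-- A also mutates the caller's dancerList in place — the equivalence proved here is about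
-- the return value only.

-- ===== PORT A =====
def pvStepA (n : Int) (acc : Option (List String × PySem.Dict String Int)) (move : String) :
    Option (List String × PySem.Dict String Int) :=
  match acc with
  | none => none
  | some (dl, dp) =>
    match PySem.Str.pyGet? move 0 with
    | none => none
    | some c =>
      if c == 's' then
        match PySem.Str.slice? move (some 1) none 1 with
        | none => none
        | some rest =>
          match PySem.Int.ofStr? rest with
          | none => none
          | some x =>
            let ed := PySem.List.slice dl (some (-x)) none
            let fr := PySem.List.slice dl none (some (-x))
            let dp' := dp.keys.foldl (fun d k => d.modify k 0 (fun v => PySem.Int.mod (v + x) n)) dp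
            some (ed ++ fr, dp')
      else if c == 'x' then
        match PySem.Str.slice? move (some 1) none 1 with
        | none => none
        | some rest =>
          match PySem.Str.split? rest "/" with
          | none => none
          | some parts =>
            match parts with
            | [sa, sb] =>
              match PySem.Int.ofStr? sa, PySem.Int.ofStr? sb with
              | some a, some b =>
                match PySem.List.pyGet? dl a, PySem.List.pyGet? dl b with
                | some temp, some vb =>
                  match PySem.List.pySet? dl a vb with
                  | none => none
                  | some dl1 =>
                    match PySem.List.pySet? dl1 b temp with
                    | none => none
                    | some dl2 =>
                      match PySem.List.pyGet? dl2 a, PySem.List.pyGet? dl2 b with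
                      | some na, some nb => some (dl2, (dp.insert na a).insert nb b)
                      | _, _ => none
                | _, _ => none
              | _, _ => none
            | _ => none
      else if c == 'p' then
        match PySem.Str.slice? move (some 1) none 1 with
        | none => none
        | some rest =>
          match PySem.Str.split? rest "/" with
          | none => none
          | some parts =>
            match parts with
            | [sa, sb] =>
              match dp.get? sa, dp.get? sb with
              | some temp, some vb =>
                let dp1 := (dp.insert sa vb).insert sb temp
                match dp1.get? sa with
                | none => none
                | some pa =>
                  match PySem.List.pySet? dl pa sa with
                  | none => none
                  | some dl1 =>
                    match dp1.get? sb with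
                    | none => none
                    | some pb =>
                      match PySem.List.pySet? dl1 pb sb with
                      | none => none
                      | some dl2 => some (dl2, dp1)
              | _, _ => none
            | _ => none
      else some (dl, dp)

def pvBuildPos (dancerList : List String) : PySem.Dict String Int :=
  (List.zip dancerList (PySem.List.pyRange 0 dancerList.length 1)).foldl
    (fun d p => d.insert p.1 p.2) PySem.Dict.empty

def pvDoDance (movesList dancerList : List String) : Option (List String) :=
  (movesList.foldl (pvStepA (dancerList.length : Int)) (some (dancerList, pvBuildPos dancerList))).map (·.1)

def pvLoopA (movesList : List String) : List Int → List String → PySem.Set String → Option Int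
  | [], _, _ => none
  | i :: rest, dl, seen =>
    match pvDoDance movesList dl with
    | none => none
    | some dl' =>
      let perm := PySem.Str.join "" dl'
      if PySem.Set.contains seen perm then some i
      else pvLoopA movesList rest dl' (PySem.Set.add seen perm)

def findCycleLen (movesList : List String) (dancerList : List String) : Option Int :=
  pvLoopA movesList (PySem.List.pyRange 1 5461 1) dancerList
    (PySem.Set.add PySem.Set.empty (PySem.Str.join "" dancerList))

-- ===== PORT B =====
inductive PvOp : Type where
  | spin (x : Int)
  | exch (a b : Int)
  | part (a b : String)
deriving DecidableEq, Repr

def pvParseOne (m : String) : Option (Option PvOp) :=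
  match PySem.Str.pyGet? m 0 with
  | none => none
  | some c =>
    if c == 's' then
      match PySem.Str.slice? m (some 1) none 1 with
      | none => none
      | some rest => (PySem.Int.ofStr? rest).map (fun x => some (PvOp.spin x))
    else if c == 'x' then
      match PySem.Str.slice? m (some 1) none 1 with
      | none => none
      | some rest =>
        match PySem.Str.split? rest "/" with
        | some [sa, sb] =>
          match PySem.Int.ofStr? sa, PySem.Int.ofStr? sb with
          | some a, some b => some (some (PvOp.exch a b))
          | _, _ => none
        | _ => none
    else if c == 'p' then
      match PySem.Str.slice? m (some 1) none 1 with
      | none => none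
      | some rest =>
        match PySem.Str.split? rest "/" with
        | some [sa, sb] => some (some (PvOp.part sa sb))
        | _ => none
    else some none

def pvParse (movesList : List String) : Option (List PvOp) :=
  movesList.foldl
    (fun acc m => acc.bind (fun ops => (pvParseOne m).map (fun o? =>
      match o? with
      | some op => ops ++ [op]
      | none => ops)))
    (some [])

def pvApplyOp (cur : List String) (op : PvOp) : Option (List String) :=
  match op with
  | .spin x =>
      some (PySem.List.slice cur (some (-x)) none ++ PySem.List.slice cur none (some (-x)))
  | .exch a b =>
      match PySem.List.pyGet? cur b, PySem.List.pyGet? cur a with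
      | some vb, some va =>
        match PySem.List.pySet? cur a vb with
        | some c1 => PySem.List.pySet? c1 b va
        | none => none
      | _, _ => none
  | .part a b =>
      some (cur.map (fun d => if d == a then b else if d == b then a else d))

def pvDanceB (ops : List PvOp) (cur : List String) : Option (List String) :=
  ops.foldl (fun acc op => acc.bind (fun c => pvApplyOp c op)) (some cur)

def pvLoopB (ops : List PvOp) (start : List String) : List Int → List String → Option Int
  | [], _ => none
  | i :: rest, cur =>
    match pvDanceB ops cur with
    | none => none
    | some cur' => if cur' == start then some i else pvLoopB ops start rest cur'

def findCycleLen_alt (movesList : List String) (dancerList : List String) : Option Int :=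
  match pvParse movesList with
  | none => none
  | some ops => pvLoopB ops dancerList (PySem.List.pyRange 1 5461 1) dancerList

-- ===== PRECONDITION & SPEC =====
def pvMoveOk (n : Nat) (names : List String) (m : String) : Bool :=
  match PySem.Str.pyGet? m 0 with
  | none => false
  | some c =>
    if c == 's' then
      match (PySem.Str.slice? m (some 1) none 1).bind PySem.Int.ofStr? with
      | some x => n == 0 || decide (x.natAbs ≤ n)
      | none => false
    else if c == 'x' then
      match PySem.Str.slice? m (some 1) none 1 with
      | none => false
      | some rest =>
        match PySem.Str.split? rest "/" with
        | some [sa, sb] =>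
          match PySem.Int.ofStr? sa, PySem.Int.ofStr? sb with
          | some a, some b => decide (PySem.Raise.InRange n a ∧ PySem.Raise.InRange n b)
          | _, _ => false
        | _ => false
    else if c == 'p' then
      match PySem.Str.slice? m (some 1) none 1 with
      | none => false
      | some rest =>
        match PySem.Str.split? rest "/" with
        | some [sa, sb] => names.contains sa && names.contains sb
        | _ => false
    else true

-- an "effective" move is one A's branch chain actually handles (spin/exchange/partner)
def pvEffective (m : String) : Bool :=
  match PySem.Str.pyGet? m 0 with
  | none => false
  | some c => c == 's' || c == 'x' || c == 'p'

-- Pre_ excludes (besides inputs on which A raises): when some move is effective, duplicate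
-- or multi-character dancer names, where A's name-keyed position dict resp. its
-- joined-string cycle detection can conflate distinct arrangements, and spin amounts
-- exceeding the list length, where A's position dictionary desynchronizes from the list —
-- artefacts of A's bookkeeping.
def Pre_findCycleLen (movesList : List String) (dancerList : List String) : Prop :=
  (∀ m ∈ movesList, pvMoveOk dancerList.length dancerList m = true) ∧
  ((∃ m ∈ movesList, pvEffective m = true) →
    dancerList.Nodup ∧ (∀ d ∈ dancerList, d.toList.length = 1))

instance (movesList : List String) (dancerList : List String) :
    Decidable (Pre_findCycleLen movesList dancerList) := by
  unfold Pre_findCycleLen; infer_instance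

def pvWitness_findCycleLen : List String × List String :=
  (["s1", "x0/1", "pa/b"], ["a", "b", "c"])

def Spec_findCycleLen (movesList : List String) (dancerList : List String) (out : Option Int) : Prop :=
  out = findCycleLen_alt movesList dancerList
instance (movesList : List String) (dancerList : List String) (out : Option Int) :
    Decidable (Spec_findCycleLen movesList dancerList out) := by
  unfold Spec_findCycleLen; infer_instance

-- ===== CLAIM (what is proved, stated in full; the proofs are below) =====
def Claim_equal_findCycleLen : Prop := ∀ (movesList : List String) (dancerList : List String), Dom_findCycleLen movesList dancerList → Pre_findCycleLen movesList dancerList → Spec_findCycleLen movesList dancerList (findCycleLen movesList dancerList)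

-- ===== LEMMAS AND PROOFS =====

-- B's state after k dances (total form; under Pre_ every dance returns `some`)
def pvIter (ops : List PvOp) (start : List String) : Nat → List String
  | 0 => start
  | k + 1 => (pvDanceB ops (pvIter ops start k)).getD []

-- invariant tying A's position dictionary to the current list
def pvInv (l : List String) (dp : PySem.Dict String Int) : Prop :=
  dp.keys.Nodup ∧
  (∀ s : String, dp.contains s = true ↔ s ∈ l) ∧
  (∀ k v, dp.get? k = some v → PySem.Raise.InRange l.length v ∧ PySem.List.pyGet? l v = some k)

def pvNorm (n : Nat) (v : Int) : Nat := (PySem.Int.mod v (n : Int)).toNat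

def pvRot {α : Type} (l : List α) (j : Nat) : List α := l.drop j ++ l.take j

-- ---- small Option/fold plumbing ----
lemma pv_parse_fold_none (ms : List String) :
    ms.foldl (fun acc m => acc.bind (fun ops => (pvParseOne m).map (fun o? =>
      match o? with
      | some op => ops ++ [op]
      | none => ops))) none = none := by
  induction ms with
  | nil => rfl
  | cons m ms ih => simpa using ih

lemma pv_parse_acc (ms : List String) : ∀ (ops0 : List PvOp),
    ms.foldl (fun acc m => acc.bind (fun ops => (pvParseOne m).map (fun o? =>
      match o? with
      | some op => ops ++ [op]
      | none => ops))) (some ops0)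
    = (pvParse ms).map (fun t => ops0 ++ t) := by
  induction ms with
  | nil => intro ops0; simp [pvParse]
  | cons m ms ih =>
    intro ops0
    simp only [pvParse, List.foldl_cons, Option.bind_some]
    cases ho : pvParseOne m with
    | none => simp [pv_parse_fold_none]
    | some o? =>
      simp only [Option.map_some]
      rw [ih, ih]
      cases hp : pvParse ms with
      | none => simp
      | some t =>
        simp only [Option.map_some]
        cases o? <;> simp

lemma pv_dance_fold_none (ops : List PvOp) :
    ops.foldl (fun acc op => acc.bind (fun c => pvApplyOp c op)) none = none := by
  induction ops with
  | nil => rfl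
  | cons op ops ih => simpa using ih

lemma pv_danceB_cons (op : PvOp) (ops : List PvOp) (l : List String) :
    pvDanceB (op :: ops) l =
      match pvApplyOp l op with
      | none => none
      | some c => pvDanceB ops c := by
  simp only [pvDanceB, List.foldl_cons, Option.bind_some]
  cases pvApplyOp l op with
  | none => simpa using pv_dance_fold_none ops
  | some c => rfl

-- ---- normalised Python indexing ----
lemma pv_norm_lt {n : Nat} (hn : 0 < n) (v : Int) : pvNorm n v < n := by
  have h1 := PySem.Int.mod_nonneg v (b := (n:Int)) (by exact_mod_cast hn)
  have h2 := PySem.Int.mod_lt v (b := (n:Int)) (by exact_mod_cast hn)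
  unfold pvNorm; omega

lemma pv_pyIdx?_eq {n : Nat} (v : Int) (h : PySem.Raise.InRange n v) :
    PySem.List.pyIdx? n v = some (pvNorm n v) := by
  obtain ⟨h1, h2⟩ := h
  have hn : 0 < (n:Int) := by
    rcases lt_or_ge v 0 with hv | hv
    · omega
    · omega
  unfold PySem.List.pyIdx? pvNorm
  have hm : PySem.Int.mod v n = v % n := PySem.Int.mod_eq_emod_of_pos hn
  rcases lt_or_ge v 0 with hv | hv
  · have hvv : v % n = v + n := by
      have h3 : (v + n) % n = v % n := by simp
      have h4 : (v + n) % n = v + n := Int.emod_eq_of_lt (by omega) (by omega)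
      omega
    simp only [if_neg (by omega : ¬ (0:Int) ≤ v), if_pos h1, hm, hvv]
    congr 1
    omega
  · have hvv : v % n = v := Int.emod_eq_of_lt hv h2
    simp only [if_pos hv, if_pos h2, hm, hvv]

lemma pv_pyGet?_norm {α : Type} (l : List α) (v : Int) (h : PySem.Raise.InRange l.length v) :
    PySem.List.pyGet? l v = l[pvNorm l.length v]? := by
  simp [PySem.List.pyGet?, pv_pyIdx?_eq v h]

lemma pv_pySet?_norm {α : Type} (l : List α) (v : Int) (w : α) (h : PySem.Raise.InRange l.length v) :
    PySem.List.pySet? l v w = some (l.set (pvNorm l.length v) w) := by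
  simp [PySem.List.pySet?, pv_pyIdx?_eq v h]

-- ---- rotations (the spin move) ----
lemma pv_slice_spin {α : Type} (l : List α) (x : Int) :
    PySem.List.slice l (some (-x)) none ++ PySem.List.slice l none (some (-x))
      = pvRot l (PySem.List.clampIdx l.length (-x)) := by
  have hc := PySem.List.clampIdx_le (n := l.length) (i := -x)
  simp only [PySem.List.slice, pvRot]
  congr 1
  apply List.take_of_length_le; simp

lemma pv_rot_perm {α : Type} (l : List α) (j : Nat) : (pvRot l j).Perm l := by
  unfold pvRot
  exact (List.perm_append_comm).trans (by rw [List.take_append_drop])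

lemma pv_rot_length {α : Type} (l : List α) (j : Nat) (hj : j ≤ l.length) :
    (pvRot l j).length = l.length := by
  simp [pvRot]; omega

lemma pv_rot_getElem? {α : Type} (l : List α) (j : Nat) (hj : j ≤ l.length)
    (i : Nat) (hi : i < l.length) :
    (pvRot l j)[i]? = l[(i + j) % l.length]? := by
  unfold pvRot
  rcases lt_or_ge i (l.length - j) with h | h
  · rw [List.getElem?_append_left (by simp; omega)]
    rw [List.getElem?_drop]
    congr 1
    rw [Nat.mod_eq_of_lt (by omega)]
    omega
  · rw [List.getElem?_append_right (by simp; omega)]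
    simp only [List.length_drop]
    have h2 : i - (l.length - j) < j := by omega
    rw [List.getElem?_take_of_lt h2]
    congr 1
    have : i + j = (i - (l.length - j)) + 1 * l.length := by omega
    rw [this, Nat.add_mul_mod_self_right, Nat.mod_eq_of_lt (by omega)]

lemma pv_rot_rot {α : Type} (l : List α) (j : Nat) (hj : j ≤ l.length) :
    pvRot (pvRot l j) (l.length - j) = l := by
  unfold pvRot
  have hd : (l.drop j).length = l.length - j := by simp
  rw [← hd, List.drop_left, List.take_left, List.take_append_drop]

-- spin amount vs clamp: with |x| ≤ n (or n = 0), the clamped start j satisfies (j + x) ≡ 0 [ZMOD n]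
lemma pv_clamp_spin {n : Nat} (x : Int) (hx : x.natAbs ≤ n) :
    (PySem.List.clampIdx n (-x) : Int) + x = 0 ∨ (PySem.List.clampIdx n (-x) : Int) + x = n := by
  unfold PySem.List.clampIdx
  rcases lt_trichotomy x 0 with h | h | h
  · left
    rw [if_neg (by omega)]
    simp only [min_def]
    rw [if_pos (by omega)]
    omega
  · subst h; left; simp
  · right
    rw [if_pos (by omega), if_neg (by omega)]
    omega

-- ---- the position dictionary ----
lemma pv_get?_eq_some_getD {d : PySem.Dict String Int} {k : String}
    (h : d.contains k = true) (d0 : Int) : d.get? k = some (d.getD k d0) := by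
  have h1 := PySem.Dict.contains_eq_isSome_get? d k
  have h2 := PySem.Dict.getD_eq_get?_getD d k d0
  cases hg : d.get? k with
  | none => rw [hg] at h1; rw [h1] at h; simp at h
  | some v => rw [hg] at h2; simp at h2; rw [h2]

lemma pv_build_get? (l : List String) (hnd : l.Nodup) :
    ∀ (a : Int) (d : PySem.Dict String Int) (k : String),
    ((l.zip (PySem.List.pyRange a (a + l.length) 1)).foldl (fun d p => d.insert p.1 p.2) d).get? k
    = match PySem.List.index? l k with
      | some i => some (a + i)
      | none => d.get? k := by
  induction l with
  | nil =>
    intro a d k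
    rw [PySem.List.pyRange_one_eq_nil (by simp : a + ((List.length ([]:List String)):Int) ≤ a)]
    have h0 : PySem.List.index? ([]:List String) k = none := by
      rw [PySem.List.index?_eq_none_iff]; simp
    rw [h0]
    simp
  | cons x xs ih =>
    intro a d k
    have hnx : x ∉ xs := (List.nodup_cons.mp hnd).1
    have hxs : xs.Nodup := (List.nodup_cons.mp hnd).2
    have he : a + (((x :: xs).length : Nat) : Int) = (a + 1) + ((xs.length : Nat) : Int) := by
      simp; ring
    have hr : PySem.List.pyRange a (a + ((x :: xs).length : Int)) 1
        = a :: PySem.List.pyRange (a + 1) ((a + 1) + (xs.length : Int)) 1 := by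
      rw [he, PySem.List.pyRange_one_cons (by have := Int.natCast_nonneg xs.length; omega)]
    rw [hr]
    simp only [List.zip_cons_cons, List.foldl_cons]
    rw [ih hxs (a+1) (d.insert x a) k]
    by_cases hk : k = x
    · subst hk
      rw [PySem.List.index?_cons_self]
      have hnone : PySem.List.index? xs k = none := by
        rw [PySem.List.index?_eq_none_iff]; exact hnx
      rw [hnone]
      simp [PySem.Dict.get?_insert_self]
    · rw [PySem.List.index?_cons_of_ne _ (Ne.symm hk)]
      cases hix : PySem.List.index? xs k with
      | none => simp [PySem.Dict.get?_insert_of_ne _ _ hk]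
      | some i => simp; omega

lemma pv_inv_build (l : List String) (hnd : l.Nodup) : pvInv l (pvBuildPos l) := by
  have hget : ∀ k, (pvBuildPos l).get? k
      = match PySem.List.index? l k with
        | some i => some ((i : Int))
        | none => none := by
    intro k
    have h := pv_build_get? l hnd 0 PySem.Dict.empty k
    rw [zero_add] at h
    unfold pvBuildPos
    rw [h]
    cases PySem.List.index? l k with
    | none => simp [PySem.Dict.get?_empty]
    | some i => simp
  refine ⟨?_, ?_, ?_⟩
  · exact PySem.Dict.nodup_keys_foldl_insert_key _ _ _ _ PySem.Dict.nodup_keys_empty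
  · intro s
    rw [PySem.Dict.contains_eq_isSome_get?, hget s]
    cases hix : PySem.List.index? l s with
    | none =>
      simp only [Option.isSome_none]
      constructor
      · intro h; simp at h
      · intro hmem
        have := (PySem.List.index?_eq_none_iff l s).mp hix
        exact absurd hmem this
    | some i =>
      simp only [Option.isSome_some]
      constructor
      · intro _
        exact (PySem.List.index?_isSome_iff l s).mp (by rw [hix]; rfl)
      · intro _; trivial
  · intro k v hv
    rw [hget k] at hv
    cases hix : PySem.List.index? l k with
    | none => rw [hix] at hv; simp at hv
    | some i =>
      rw [hix] at hv
      simp only [Option.some_inj] at hv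
      obtain ⟨hlt, hvk, _⟩ := PySem.List.getElem_of_index?_eq_some hix
      subst hv
      refine ⟨⟨by omega, by exact_mod_cast hlt⟩, ?_⟩
      rw [PySem.List.pyGet?_natCast]
      rw [List.getElem?_eq_getElem hlt, hvk]

lemma pv_get?_foldl_modify (f : Int → Int) (ks : List String) :
    ∀ (d : PySem.Dict String Int) (k : String), ks.Nodup →
    ((ks.foldl (fun d k => d.modify k 0 f) d)).get? k
      = if k ∈ ks then some (f (d.getD k 0)) else d.get? k := by
  induction ks with
  | nil => intro d k _; simp
  | cons x xs ih =>
    intro d k hnd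
    have hnx : x ∉ xs := (List.nodup_cons.mp hnd).1
    have hxs : xs.Nodup := (List.nodup_cons.mp hnd).2
    simp only [List.foldl_cons]
    rw [ih (d.modify x 0 f) k hxs]
    by_cases hk : k = x
    · subst hk
      rw [if_neg hnx, if_pos (by simp)]
      simp only [PySem.Dict.modify]
      rw [PySem.Dict.get?_insert_self]
    · simp only [List.mem_cons, hk, false_or]
      by_cases hm : k ∈ xs
      · rw [if_pos hm, if_pos hm]
        congr 2
        simp only [PySem.Dict.modify]
        rw [PySem.Dict.getD_insert_of_ne]
        exact hk
      · rw [if_neg hm, if_neg hm]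
        simp only [PySem.Dict.modify]
        rw [PySem.Dict.get?_insert_of_ne _ _ hk]

lemma pv_norm_idem {n : Nat} (hn : 0 < n) (u : Int) :
    pvNorm n (PySem.Int.mod u (n : Int)) = pvNorm n u := by
  unfold pvNorm
  rw [PySem.Int.mod_eq_emod_of_pos (by exact_mod_cast hn)]
  rw [PySem.Int.mod_eq_emod_of_pos (by exact_mod_cast hn)]
  rw [Int.emod_emod_of_dvd _ dvd_rfl]

lemma pv_norm_cast {n : Nat} (hn : 0 < n) (u : Int) : ((pvNorm n u : Nat) : Int) = u % (n : Int) := by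
  unfold pvNorm
  rw [PySem.Int.mod_eq_emod_of_pos (by exact_mod_cast hn)]
  have := Int.emod_nonneg u (by omega : (n:Int) ≠ 0)
  omega

lemma pv_spin_pos {n : Nat} (hn : 0 < n) (v x : Int) (hx : x.natAbs ≤ n) :
    (pvNorm n (v + x) + PySem.List.clampIdx n (-x)) % n = pvNorm n v := by
  have hj := pv_clamp_spin (n := n) x hx
  have hcast : (((pvNorm n (v + x) + PySem.List.clampIdx n (-x)) % n : Nat) : Int)
      = ((pvNorm n (v + x) : Int) + (PySem.List.clampIdx n (-x) : Int)) % (n : Int) := by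
    push_cast
    rfl
  have hi : (pvNorm n (v + x) : Int) = (v + x) % (n : Int) := pv_norm_cast hn _
  apply Nat.cast_injective (R := Int)
  rw [hcast, hi, Int.emod_add_emod, pv_norm_cast hn v]
  rcases hj with hj | hj
  · congr 1
    omega
  · have he : v + x + (PySem.List.clampIdx n (-x) : Int) = v + (n : Int) * 1 := by omega
    rw [he, Int.add_mul_emod_self_left]

-- ---- the partner move as a name swap ----
lemma pv_set_swap (l : List String) (hnd : l.Nodup) (a b : String) (qa qb : Nat)
    (hqa : qa < l.length) (hqb : qb < l.length)
    (ha : l[qa]'hqa = a) (hb : l[qb]'hqb = b) :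
    (l.set qb a).set qa b = l.map (fun d => if d == a then b else if d == b then a else d) := by
  apply List.ext_getElem (by simp)
  intro i hl1 hl2
  simp only [List.getElem_set, List.getElem_map]
  have hinj : ∀ (p q : Nat) (hp : p < l.length) (hq : q < l.length), l[p]'hp = l[q]'hq → p = q := by
    intro p q hp hq h
    exact (List.Nodup.getElem_inj_iff hnd).mp h
  have hi : i < l.length := by simpa using hl1
  by_cases hia : i = qa
  · subst hia
    rw [if_pos rfl]
    have hx : l[i] = a := ha
    simp [hx]
  · rw [if_neg (fun h => hia h.symm)]
    by_cases hib : i = qb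
    · subst hib
      rw [if_pos rfl]
      have hba : l[i] = b := hb
      by_cases hab : b = a
      · subst hab
        have : i = qa := hinj i qa hi hqa (by rw [hba, ha])
        exact absurd this hia
      · simp [hba, hab]
    · rw [if_neg (fun h => hib h.symm)]
      have hx1 : l[i] ≠ a := fun h => hia (hinj i qa hi hqa (by rw [h, ha]))
      have hx2 : l[i] ≠ b := fun h => hib (hinj i qb hi hqb (by rw [h, hb]))
      simp [hx1, hx2]

-- ---- per-move agreement ----
lemma pv_step_agree (dancers : List String) (hnd : dancers.Nodup) (m : String)
    (hm : pvMoveOk dancers.length dancers m = true)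
    (l : List String) (dp : PySem.Dict String Int)
    (hG : l.Perm dancers) (hInv : pvInv l dp) :
    ∃ o? l' dp', pvParseOne m = some o? ∧
      pvStepA (dancers.length : Int) (some (l, dp)) m = some (l', dp') ∧
      (match o? with
       | none => l' = l
       | some op => pvApplyOp l op = some l') ∧
      l'.Perm dancers ∧ pvInv l' dp' := by
  obtain ⟨hKnd, hCon, hPos⟩ := hInv
  have hndl : l.Nodup := hG.nodup_iff.mpr hnd
  have hlen : l.length = dancers.length := hG.length_eq
  simp only [pvMoveOk] at hm
  cases hc0 : PySem.Str.pyGet? m 0 with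
  | none => rw [hc0] at hm; simp at hm
  | some c =>
  rw [hc0] at hm
  simp only at hm
  by_cases hcs : c = 's'
  · -- spin
    subst hcs
    rw [if_pos (by decide)] at hm
    cases hrest : PySem.Str.slice? m (some 1) none 1 with
    | none => rw [hrest] at hm; simp at hm
    | some rest =>
    rw [hrest] at hm
    simp only [Option.bind_some] at hm
    cases hx : PySem.Int.ofStr? rest with
    | none => rw [hx] at hm; simp at hm
    | some x =>
    rw [hx] at hm
    simp only [Option.bind_some] at hm
    set j := PySem.List.clampIdx l.length (-x) with hj
    have hjle : j ≤ l.length := PySem.List.clampIdx_le _ _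
    set l' := pvRot l j with hl'
    set dp' := dp.keys.foldl
      (fun d k => d.modify k 0 (fun v => PySem.Int.mod (v + x) (dancers.length : Int))) dp with hdp'
    refine ⟨some (.spin x), l', dp', ?_, ?_, ?_, ?_, ?_⟩
    · simp only [pvParseOne, hc0]
      rw [if_pos (by decide)]
      simp only [hrest, hx, Option.map_some]
    · show pvStepA (dancers.length : Int) (some (l, dp)) m = some (l', dp')
      unfold pvStepA
      rw [hc0]
      try simp only [hrest, hx]
      rw [if_pos (by decide)]
      try simp only [hrest, hx]
      rw [pv_slice_spin]
    · simp only [pvApplyOp]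
      rw [pv_slice_spin]
    · exact (pv_rot_perm l j).trans hG
    · -- invariant
      have hkeys : dp'.keys = dp.keys := by
        rw [hdp', PySem.Dict.keys_foldl_modify, PySem.Set.update_eq_append_filter]
        have : ((PySem.Set.ofList dp.keys).filter
            (fun y => !(PySem.Set.contains dp.keys y))) = [] := by
          apply List.filter_eq_nil_iff.mpr
          intro y hy
          have hyk : y ∈ dp.keys := (PySem.Set.mem_ofList _ _).mp hy
          simp [PySem.Set.contains, hyk]
        rw [this, List.append_nil]
      have hmem' : ∀ s : String, s ∈ l' ↔ s ∈ l := fun s => (pv_rot_perm l j).mem_iff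
      refine ⟨by rw [hkeys]; exact hKnd, ?_, ?_⟩
      · intro t
        rw [PySem.Dict.contains_iff_mem_keys, hkeys, ← PySem.Dict.contains_iff_mem_keys,
          hCon t, hmem' t]
      · intro k v hv
        rw [hdp', pv_get?_foldl_modify _ _ dp k hKnd] at hv
        by_cases hk : k ∈ dp.keys
        · rw [if_pos hk] at hv
          have hcont : dp.contains k = true := (PySem.Dict.contains_iff_mem_keys _ _).mpr hk
          have hmeml : k ∈ l := (hCon k).mp hcont
          have hn0 : 0 < l.length := List.length_pos_of_mem hmeml
          have hxn : x.natAbs ≤ l.length := by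
            rcases Bool.or_eq_true_iff.mp hm with h0 | hle
            · exfalso
              have : dancers.length = 0 := by simpa using h0
              omega
            · have := of_decide_eq_true hle
              omega
          set w := dp.getD k 0 with hw
          have hgk : dp.get? k = some w := pv_get?_eq_some_getD hcont 0
          obtain ⟨hwr, hwg⟩ := hPos k w hgk
          have hv' : v = PySem.Int.mod (w + x) (dancers.length : Int) := by
            simp only [Option.some_inj] at hv
            omega
          have hlen' : l'.length = l.length := pv_rot_length l j hjle
          have hnI : (0:Int) < (dancers.length : Int) := by
            exact_mod_cast (by omega : 0 < dancers.length)
          have hvnn : 0 ≤ v := by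
            rw [hv']
            exact PySem.Int.mod_nonneg _ hnI
          have hvlt : v < (dancers.length : Int) := by
            rw [hv']
            exact PySem.Int.mod_lt _ hnI
          have hvr : PySem.Raise.InRange l'.length v := by
            constructor <;> (rw [hlen', hlen]; omega)
          refine ⟨hvr, ?_⟩
          rw [pv_pyGet?_norm l' v hvr]
          have hnorm : pvNorm l'.length v = pvNorm l.length (w + x) := by
            rw [hlen', hlen, hv']
            exact pv_norm_idem (by omega) _
          rw [hnorm]
          have hilt : pvNorm l.length (w + x) < l.length := pv_norm_lt hn0 _
          rw [hl', pv_rot_getElem? l j hjle _ hilt]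
          rw [pv_spin_pos hn0 w x hxn]
          rw [← pv_pyGet?_norm l w hwr]
          exact hwg
        · exfalso
          rw [if_neg hk] at hv
          have : dp.contains k = true := by
            rw [PySem.Dict.contains_eq_isSome_get?, hv]
            rfl
          exact hk ((PySem.Dict.contains_iff_mem_keys _ _).mp this)
  · -- not spin
    rw [if_neg (by simpa using hcs)] at hm
    by_cases hcx : c = 'x'
    · -- exchange
      subst hcx
      rw [if_pos (by decide)] at hm
      cases hrest : PySem.Str.slice? m (some 1) none 1 with
      | none => rw [hrest] at hm; simp at hm
      | some rest =>
      rw [hrest] at hm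
      simp only at hm
      cases hsp : PySem.Str.split? rest "/" with
      | none => rw [hsp] at hm; simp at hm
      | some parts =>
      rw [hsp] at hm
      rcases parts with _ | ⟨sa, _ | ⟨sb, _ | ⟨s3, prest⟩⟩⟩
      · simp at hm
      · simp at hm
      swap
      · simp at hm
      simp only at hm
      cases hsa : PySem.Int.ofStr? sa with
      | none => rw [hsa] at hm; simp at hm
      | some a =>
      rw [hsa] at hm
      cases hsb : PySem.Int.ofStr? sb with
      | none => rw [hsb] at hm; simp at hm
      | some b =>
      rw [hsb] at hm
      simp only at hm
      obtain ⟨hia, hib⟩ := of_decide_eq_true hm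
      have hn0 : 0 < dancers.length := by obtain ⟨h1, h2⟩ := hia; omega
      have hlen0 : 0 < l.length := by omega
      have hra : PySem.Raise.InRange l.length a := by
        obtain ⟨h1, h2⟩ := hia; constructor <;> (rw [hlen]; omega)
      have hrb : PySem.Raise.InRange l.length b := by
        obtain ⟨h1, h2⟩ := hib; constructor <;> (rw [hlen]; omega)
      have hqa : pvNorm l.length a < l.length := pv_norm_lt hlen0 a
      have hqb : pvNorm l.length b < l.length := pv_norm_lt hlen0 b
      set qa := pvNorm l.length a with hqadef
      set qb := pvNorm l.length b with hqbdef
      set va := l[qa]'hqa with hvadef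
      set vb := l[qb]'hqb with hvbdef
      have hgeta : PySem.List.pyGet? l a = some va := by
        rw [pv_pyGet?_norm l a hra]
        exact List.getElem?_eq_getElem hqa
      have hgetb : PySem.List.pyGet? l b = some vb := by
        rw [pv_pyGet?_norm l b hrb]
        exact List.getElem?_eq_getElem hqb
      have hset1 : PySem.List.pySet? l a vb = some (l.set qa vb) := pv_pySet?_norm l a vb hra
      set dl1 := l.set qa vb with hdl1
      have hlen1 : dl1.length = l.length := by simp [hdl1]
      have hrb1 : PySem.Raise.InRange dl1.length b := by rw [hlen1]; exact hrb
      have hnorm1 : pvNorm dl1.length b = qb := by rw [hlen1]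
      have hset2 : PySem.List.pySet? dl1 b va = some (dl1.set qb va) := by
        rw [pv_pySet?_norm dl1 b va hrb1, hnorm1]
      set dl2 := dl1.set qb va with hdl2
      have hlen2 : dl2.length = l.length := by simp [hdl2, hdl1]
      have hra2 : PySem.Raise.InRange dl2.length a := by rw [hlen2]; exact hra
      have hrb2 : PySem.Raise.InRange dl2.length b := by rw [hlen2]; exact hrb
      have hqa2 : qa < dl2.length := by omega
      have hqb2 : qb < dl2.length := by omega
      set na := dl2[qa]'hqa2 with hnadef
      set nb := dl2[qb]'hqb2 with hnbdef
      have hget2a : PySem.List.pyGet? dl2 a = some na := by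
        rw [pv_pyGet?_norm dl2 a hra2]
        have : pvNorm dl2.length a = qa := by rw [hlen2]
        rw [this]
        exact List.getElem?_eq_getElem hqa2
      have hget2b : PySem.List.pyGet? dl2 b = some nb := by
        rw [pv_pyGet?_norm dl2 b hrb2]
        have : pvNorm dl2.length b = qb := by rw [hlen2]
        rw [this]
        exact List.getElem?_eq_getElem hqb2
      have hnb_eq : nb = va := by
        show (dl1.set qb va)[qb]'hqb2 = va
        exact List.getElem_set_self hqb2
      have hperm2 : dl2.Perm l := by
        rw [hdl2, hdl1, hvadef, hvbdef]
        exact List.set_set_perm hqa hqb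
      refine ⟨some (.exch a b), dl2, (dp.insert na a).insert nb b, ?_, ?_, ?_, hperm2.trans hG, ?_⟩
      · unfold pvParseOne
        rw [hc0]
        dsimp only
        rw [if_neg (by simpa using hcs), if_pos (by decide), hrest]
        dsimp only
        rw [hsp]
        dsimp only
        rw [hsa, hsb]
      · unfold pvStepA
        rw [hc0]
        dsimp only
        rw [if_neg (by simpa using hcs), if_pos (by decide), hrest]
        dsimp only
        rw [hsp]
        dsimp only
        rw [hsa, hsb]
        dsimp only
        rw [hgeta, hgetb]
        dsimp only
        rw [hset1]
        dsimp only
        rw [hset2]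
        dsimp only
        rw [hget2a, hget2b]
      · simp only [pvApplyOp]
        rw [hgetb, hgeta]
        dsimp only
        rw [hset1]
        dsimp only
        rw [hset2]
      · -- invariant
        have hmem2 : ∀ t : String, t ∈ dl2 ↔ t ∈ l := fun t => hperm2.mem_iff
        have hna_mem : na ∈ l := (hmem2 na).mp (List.getElem_mem _)
        have hnb_mem : nb ∈ l := (hmem2 nb).mp (List.getElem_mem _)
        have hconta : dp.contains na = true := (hCon na).mpr hna_mem
        have hcontb : (dp.insert na a).contains nb = true := by
          rw [PySem.Dict.contains_insert]
          rcases hc : nb == na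
          · simp only [Bool.false_or]
            exact (hCon nb).mpr hnb_mem
          · simp
        have hkeys : ((dp.insert na a).insert nb b).keys = dp.keys := by
          rw [PySem.Dict.keys_insert_of_contains (h := hcontb),
            PySem.Dict.keys_insert_of_contains (h := hconta)]
        refine ⟨by rw [hkeys]; exact hKnd, ?_, ?_⟩
        · intro t
          rw [PySem.Dict.contains_iff_mem_keys, hkeys, ← PySem.Dict.contains_iff_mem_keys,
            hCon t, hmem2 t]
        · intro k v hv
          rw [PySem.Dict.get?_insert] at hv
          by_cases hknb : k = nb
          · rw [if_pos hknb] at hv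
            simp only [Option.some_inj] at hv
            subst hknb
            cases hv
            exact ⟨hrb2, hget2b⟩
          · rw [if_neg hknb, PySem.Dict.get?_insert] at hv
            by_cases hkna : k = na
            · rw [if_pos hkna] at hv
              simp only [Option.some_inj] at hv
              subst hkna
              cases hv
              exact ⟨hra2, hget2a⟩
            · rw [if_neg hkna] at hv
              obtain ⟨hvr, hvg⟩ := hPos k v hv
              have hvr2 : PySem.Raise.InRange dl2.length v := by rw [hlen2]; exact hvr
              have hrlt : pvNorm l.length v < l.length := pv_norm_lt hlen0 v
              have hlr : l[pvNorm l.length v]'hrlt = k := by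
                rw [pv_pyGet?_norm l v hvr] at hvg
                exact (List.getElem?_eq_some_iff.mp hvg).2
              refine ⟨hvr2, ?_⟩
              rw [pv_pyGet?_norm dl2 v hvr2]
              have hn2 : pvNorm dl2.length v = pvNorm l.length v := by rw [hlen2]
              rw [hn2]
              set r := pvNorm l.length v with hrdef
              have hlr? : l[r]? = some k := by rw [List.getElem?_eq_getElem hrlt, hlr]
              have hkvb : r = qb → k = vb := by
                intro he
                rw [he, List.getElem?_eq_getElem hqb] at hlr?
                exact (Option.some_inj.mp hlr?).symm
              have hkva : r = qa → k = va := by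
                intro he
                rw [he, List.getElem?_eq_getElem hqa] at hlr?
                exact (Option.some_inj.mp hlr?).symm
              have hva_vb : qa = qb → va = vb := by
                intro he
                have h1 : l[qa]? = l[qb]? := by rw [he]
                rw [List.getElem?_eq_getElem hqa, List.getElem?_eq_getElem hqb] at h1
                exact Option.some_inj.mp h1
              have hna_vb : qa ≠ qb → na = vb := by
                intro hqq
                have h1 : dl2[qa]? = some vb := by
                  show (dl1.set qb va)[qa]? = some vb
                  rw [List.getElem?_set_ne (fun h => hqq h.symm)]
                  show (l.set qa vb)[qa]? = some vb
                  rw [List.getElem?_eq_getElem (by simpa using hqa)]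
                  rw [List.getElem_set_self]
                have h2 : dl2[qa]? = some na := List.getElem?_eq_getElem hqa2
                exact Option.some_inj.mp (h2.symm.trans h1)
              have hrqb : r ≠ qb := by
                intro he
                by_cases hqq : qa = qb
                · exact hknb ((hkvb he).trans ((hva_vb hqq).symm.trans hnb_eq.symm))
                · exact hkna ((hkvb he).trans (hna_vb hqq).symm)
              have hrqa : r ≠ qa := by
                intro he
                exact hknb ((hkva he).trans hnb_eq.symm)
              show (dl1.set qb va)[r]? = some k
              rw [List.getElem?_set_ne (fun h => hrqb h.symm)]
              show (l.set qa vb)[r]? = some k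
              rw [List.getElem?_set_ne (fun h => hrqa h.symm)]
              exact hlr?
    · by_cases hcp : c = 'p'
      · -- partner
        rw [if_neg (by simpa using hcx)] at hm
        subst hcp
        rw [if_pos (by decide)] at hm
        cases hrest : PySem.Str.slice? m (some 1) none 1 with
        | none => rw [hrest] at hm; simp at hm
        | some rest =>
        rw [hrest] at hm
        simp only at hm
        cases hsp : PySem.Str.split? rest "/" with
        | none => rw [hsp] at hm; simp at hm
        | some parts =>
        rw [hsp] at hm
        rcases parts with _ | ⟨sa, _ | ⟨sb, _ | ⟨s3, prest⟩⟩⟩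
        · simp at hm
        · simp at hm
        swap
        · simp at hm
        simp only at hm
        obtain ⟨hca', hcb'⟩ := Bool.and_eq_true_iff.mp hm
        have hsa_d : sa ∈ dancers := by simpa using hca'
        have hsb_d : sb ∈ dancers := by simpa using hcb'
        have hsa_l : sa ∈ l := hG.mem_iff.mpr hsa_d
        have hsb_l : sb ∈ l := hG.mem_iff.mpr hsb_d
        have hconta : dp.contains sa = true := (hCon sa).mpr hsa_l
        have hcontb : dp.contains sb = true := (hCon sb).mpr hsb_l
        set temp := dp.getD sa 0 with htempdef
        set vbp := dp.getD sb 0 with hvbpdef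
        have hga : dp.get? sa = some temp := pv_get?_eq_some_getD hconta 0
        have hgb : dp.get? sb = some vbp := pv_get?_eq_some_getD hcontb 0
        obtain ⟨hrta, hpa⟩ := hPos sa temp hga
        obtain ⟨hrtb, hpb⟩ := hPos sb vbp hgb
        have hlen0 : 0 < l.length := List.length_pos_of_mem hsa_l
        have hqa : pvNorm l.length temp < l.length := pv_norm_lt hlen0 _
        have hqb : pvNorm l.length vbp < l.length := pv_norm_lt hlen0 _
        set qa := pvNorm l.length temp with hqadef
        set qb := pvNorm l.length vbp with hqbdef
        have hlqa : l[qa]'hqa = sa := by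
          rw [pv_pyGet?_norm l temp hrta] at hpa
          exact (List.getElem?_eq_some_iff.mp hpa).2
        have hlqb : l[qb]'hqb = sb := by
          rw [pv_pyGet?_norm l vbp hrtb] at hpb
          exact (List.getElem?_eq_some_iff.mp hpb).2
        by_cases hsab : sa = sb
        · -- same name twice: everything is unchanged
          cases hsab
          have hvt : vbp = temp := rfl
          have hqq : qb = qa := rfl
          have hg1 : ((dp.insert sa temp).insert sa temp).get? sa = some temp :=
            PySem.Dict.get?_insert_self _ _ _
          have hsetid : l.set qa sa = l := by
            conv_lhs => rw [← hlqa]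
            exact List.set_getElem_self hqa
          have hset1 : PySem.List.pySet? l temp sa = some l := by
            rw [pv_pySet?_norm l temp sa hrta]
            rw [show pvNorm l.length temp = qa from rfl, hsetid]
          refine ⟨some (.part sa sa), l, (dp.insert sa temp).insert sa temp, ?_, ?_, ?_, hG, ?_⟩
          · unfold pvParseOne
            rw [hc0]
            dsimp only
            rw [if_neg (by simpa using hcs), if_neg (by simpa using hcx),
              if_pos (by decide), hrest]
            dsimp only
            rw [hsp]
          · unfold pvStepA
            rw [hc0]
            dsimp only
            rw [if_neg (by simpa using hcs), if_neg (by simpa using hcx),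
              if_pos (by decide), hrest]
            dsimp only
            rw [hsp]
            dsimp only
            rw [hga]
            dsimp only
            rw [hg1]
            dsimp only
            rw [hset1]
            try dsimp only
            try rw [hg1]
            try dsimp only
            try rw [hset1]
          · simp only [pvApplyOp]
            congr 1
            have h1 : ∀ d ∈ l, (if d == sa then sa else if d == sa then sa else d) = id d := by
              intro d _
              by_cases hd : d = sa <;> simp [hd]
            rw [List.map_congr_left h1, List.map_id]
          · -- invariant (state unchanged, dict re-inserts the same position)
            have hkeys : ((dp.insert sa temp).insert sa temp).keys = dp.keys := by
              rw [PySem.Dict.keys_insert_of_contains (h := PySem.Dict.contains_insert_self _ _ _),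
                PySem.Dict.keys_insert_of_contains (h := hconta)]
            refine ⟨by rw [hkeys]; exact hKnd, ?_, ?_⟩
            · intro t
              rw [PySem.Dict.contains_iff_mem_keys, hkeys, ← PySem.Dict.contains_iff_mem_keys,
                hCon t]
            · intro k v hv
              rw [PySem.Dict.get?_insert] at hv
              by_cases hk : k = sa
              · rw [if_pos hk] at hv
                simp only [Option.some_inj] at hv
                subst hk
                refine ⟨?_, ?_⟩
                · rw [← hv]; exact hrta
                · rw [← hv]; exact hpa
              · rw [if_neg hk, PySem.Dict.get?_insert, if_neg hk] at hv
                exact hPos k v hv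
        · -- distinct names: positions swapped, list gets the name swap
          have hqaqb : qa ≠ qb := by
            intro he
            apply hsab
            rw [← hlqa, ← hlqb]
            have h1 : l[qa]? = l[qb]? := by rw [he]
            rw [List.getElem?_eq_getElem hqa, List.getElem?_eq_getElem hqb] at h1
            exact Option.some_inj.mp h1
          have hg1a : ((dp.insert sa vbp).insert sb temp).get? sa = some vbp := by
            rw [PySem.Dict.get?_insert, if_neg hsab]
            exact PySem.Dict.get?_insert_self _ _ _
          have hg1b : ((dp.insert sa vbp).insert sb temp).get? sb = some temp :=
            PySem.Dict.get?_insert_self _ _ _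
          have hset1 : PySem.List.pySet? l vbp sa = some (l.set qb sa) :=
            pv_pySet?_norm l vbp sa hrtb
          set dl1 := l.set qb sa with hdl1
          have hlen1 : dl1.length = l.length := by simp [hdl1]
          have hrta1 : PySem.Raise.InRange dl1.length temp := by rw [hlen1]; exact hrta
          have hset2 : PySem.List.pySet? dl1 temp sb = some (dl1.set qa sb) := by
            rw [pv_pySet?_norm dl1 temp sb hrta1]
            have : pvNorm dl1.length temp = qa := by rw [hlen1]
            rw [this]
          set dl2 := dl1.set qa sb with hdl2
          have hlen2 : dl2.length = l.length := by simp [hdl2, hdl1]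
          have hswap : dl2 = l.map (fun d => if d == sa then sb else if d == sb then sa else d) := by
            rw [hdl2, hdl1]
            exact pv_set_swap l hndl sa sb qa qb hqa hqb hlqa hlqb
          have hperm2 : dl2.Perm l := by
            rw [hdl2, hdl1]
            conv_lhs => rw [← hlqa, ← hlqb]
            exact List.set_set_perm hqb hqa
          refine ⟨some (.part sa sb), dl2, (dp.insert sa vbp).insert sb temp, ?_, ?_, ?_,
            hperm2.trans hG, ?_⟩
          · unfold pvParseOne
            rw [hc0]
            dsimp only
            rw [if_neg (by simpa using hcs), if_neg (by simpa using hcx),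
              if_pos (by decide), hrest]
            dsimp only
            rw [hsp]
          · unfold pvStepA
            rw [hc0]
            dsimp only
            rw [if_neg (by simpa using hcs), if_neg (by simpa using hcx),
              if_pos (by decide), hrest]
            dsimp only
            rw [hsp]
            dsimp only
            rw [hga, hgb]
            dsimp only
            rw [hg1a]
            dsimp only
            rw [hset1]
            dsimp only
            rw [hg1b]
            dsimp only
            rw [hset2]
          · simp only [pvApplyOp]
            rw [hswap]
          · -- invariant
            have hmem2 : ∀ t : String, t ∈ dl2 ↔ t ∈ l := fun t => hperm2.mem_iff
            have hcontb1 : (dp.insert sa vbp).contains sb = true := by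
              rw [PySem.Dict.contains_insert]
              rcases hc : sb == sa
              · simp only [Bool.false_or]
                exact hcontb
              · simp
            have hkeys : ((dp.insert sa vbp).insert sb temp).keys = dp.keys := by
              rw [PySem.Dict.keys_insert_of_contains (h := hcontb1),
                PySem.Dict.keys_insert_of_contains (h := hconta)]
            refine ⟨by rw [hkeys]; exact hKnd, ?_, ?_⟩
            · intro t
              rw [PySem.Dict.contains_iff_mem_keys, hkeys, ← PySem.Dict.contains_iff_mem_keys,
                hCon t, ← hmem2 t]
            · intro k v hv
              rw [PySem.Dict.get?_insert] at hv
              by_cases hksb : k = sb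
              · rw [if_pos hksb] at hv
                simp only [Option.some_inj] at hv
                refine ⟨by rw [← hv, hlen2]; exact hrta, ?_⟩
                rw [← hv, hksb]
                rw [pv_pyGet?_norm dl2 temp (by rw [hlen2]; exact hrta)]
                have : pvNorm dl2.length temp = qa := by rw [hlen2]
                rw [this]
                show (dl1.set qa sb)[qa]? = some sb
                rw [List.getElem?_eq_getElem (by rw [List.length_set]; omega)]
                rw [List.getElem_set_self]
              · rw [if_neg hksb, PySem.Dict.get?_insert] at hv
                by_cases hksa : k = sa
                · rw [if_pos hksa] at hv
                  simp only [Option.some_inj] at hv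
                  refine ⟨by rw [← hv, hlen2]; exact hrtb, ?_⟩
                  rw [← hv, hksa]
                  rw [pv_pyGet?_norm dl2 vbp (by rw [hlen2]; exact hrtb)]
                  have : pvNorm dl2.length vbp = qb := by rw [hlen2]
                  rw [this]
                  show (dl1.set qa sb)[qb]? = some sa
                  rw [List.getElem?_set_ne hqaqb]
                  show (l.set qb sa)[qb]? = some sa
                  rw [List.getElem?_eq_getElem (by rw [List.length_set]; omega)]
                  rw [List.getElem_set_self]
                · rw [if_neg hksa] at hv
                  obtain ⟨hvr, hvg⟩ := hPos k v hv
                  have hvr2 : PySem.Raise.InRange dl2.length v := by rw [hlen2]; exact hvr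
                  have hrlt : pvNorm l.length v < l.length := pv_norm_lt hlen0 v
                  have hlr : l[pvNorm l.length v]'hrlt = k := by
                    rw [pv_pyGet?_norm l v hvr] at hvg
                    exact (List.getElem?_eq_some_iff.mp hvg).2
                  refine ⟨hvr2, ?_⟩
                  rw [pv_pyGet?_norm dl2 v hvr2]
                  have hn2 : pvNorm dl2.length v = pvNorm l.length v := by rw [hlen2]
                  rw [hn2]
                  set r := pvNorm l.length v with hrdef
                  have hlr? : l[r]? = some k := by rw [List.getElem?_eq_getElem hrlt, hlr]
                  have hrqa : r ≠ qa := by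
                    intro he
                    apply hksa
                    rw [he, List.getElem?_eq_getElem hqa] at hlr?
                    rw [← hlqa]
                    exact (Option.some_inj.mp hlr?).symm
                  have hrqb : r ≠ qb := by
                    intro he
                    apply hksb
                    rw [he, List.getElem?_eq_getElem hqb] at hlr?
                    rw [← hlqb]
                    exact (Option.some_inj.mp hlr?).symm
                  show (dl1.set qa sb)[r]? = some k
                  rw [List.getElem?_set_ne (fun h => hrqa h.symm)]
                  show (l.set qb sa)[r]? = some k
                  rw [List.getElem?_set_ne (fun h => hrqb h.symm)]
                  exact hlr?
      · -- unknown move: both skip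
        rw [if_neg (by simpa using hcx), if_neg (by simpa using hcp)] at hm
        refine ⟨none, l, dp, ?_, ?_, rfl, hG, ⟨hKnd, hCon, hPos⟩⟩
        · unfold pvParseOne
          rw [hc0]
          dsimp only
          rw [if_neg (by simpa using hcs), if_neg (by simpa using hcx),
            if_neg (by simpa using hcp)]
        · unfold pvStepA
          rw [hc0]
          dsimp only
          rw [if_neg (by simpa using hcs), if_neg (by simpa using hcx),
            if_neg (by simpa using hcp)]

-- ---- per-dance agreement ----
lemma pv_dance_agree (dancers : List String) (hnd : dancers.Nodup) (moves : List String)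
    (hOk : ∀ m ∈ moves, pvMoveOk dancers.length dancers m = true) :
    ∀ l dp, l.Perm dancers → pvInv l dp →
    ∃ l' dp' ops, pvParse moves = some ops ∧
      moves.foldl (pvStepA (dancers.length : Int)) (some (l, dp)) = some (l', dp') ∧
      pvDanceB ops l = some l' ∧ l'.Perm dancers ∧ pvInv l' dp' := by
  induction moves with
  | nil =>
    intro l dp hG hInv
    exact ⟨l, dp, [], rfl, rfl, rfl, hG, hInv⟩
  | cons mov ms ih =>
    intro l dp hG hInv
    have hOkm : pvMoveOk dancers.length dancers mov = true := hOk mov (by simp)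
    have hOks : ∀ m ∈ ms, pvMoveOk dancers.length dancers m = true :=
      fun m hm => hOk m (by simp [hm])
    obtain ⟨o?, l1, dp1, hparse1, hstep, happ, hG1, hInv1⟩ :=
      pv_step_agree dancers hnd mov hOkm l dp hG hInv
    obtain ⟨l', dp', ops', hparse', hfold, hdance, hG', hInv'⟩ := ih hOks l1 dp1 hG1 hInv1
    cases o? with
    | none =>
      simp only at happ
      refine ⟨l', dp', ops', ?_, ?_, ?_, hG', hInv'⟩
      · simp only [pvParse, List.foldl_cons, Option.bind_some]
        rw [hparse1]
        simp only [Option.map_some]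
        rw [pv_parse_acc ms _, hparse']
        simp
      · simp only [List.foldl_cons]
        rw [hstep]
        exact hfold
      · rw [happ] at hdance
        exact hdance
    | some op =>
      simp only at happ
      refine ⟨l', dp', op :: ops', ?_, ?_, ?_, hG', hInv'⟩
      · simp only [pvParse, List.foldl_cons, Option.bind_some]
        rw [hparse1]
        simp only [Option.map_some]
        rw [pv_parse_acc ms _, hparse']
        simp
      · simp only [List.foldl_cons]
        rw [hstep]
        exact hfold
      · rw [pv_danceB_cons, happ]
        exact hdance

lemma pv_doDance_agree (dancers : List String) (moves : List String) (hnd : dancers.Nodup)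
    (hOk : ∀ m ∈ moves, pvMoveOk dancers.length dancers m = true)
    (ops : List PvOp) (hops : pvParse moves = some ops)
    (l : List String) (hG : l.Perm dancers) :
    ∃ l', pvDoDance moves l = some l' ∧ pvDanceB ops l = some l' ∧ l'.Perm dancers := by
  have hndl : l.Nodup := hG.nodup_iff.mpr hnd
  obtain ⟨l', dp', ops2, hp2, hfold, hdance, hG', _⟩ :=
    pv_dance_agree dancers hnd moves hOk l (pvBuildPos l) hG (pv_inv_build l hndl)
  have hops2 : ops2 = ops := by
    rw [hops] at hp2
    exact (Option.some_inj.mp hp2).symm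
  subst hops2
  refine ⟨l', ?_, hdance, hG'⟩
  unfold pvDoDance
  have hcast : ((l.length : Nat) : Int) = ((dancers.length : Nat) : Int) := by
    rw [hG.length_eq]
  rw [hcast, hfold]
  rfl

-- ---- injectivity of one dance ----
lemma pv_pyIdx?_some {n : Nat} {v : Int} {q : Nat} (h : PySem.List.pyIdx? n v = some q) :
    PySem.Raise.InRange n v := by
  unfold PySem.List.pyIdx? at h
  constructor <;> (split_ifs at h <;> omega)

lemma pv_pyGet?_some {α : Type} {l : List α} {v : Int} {w : α}
    (h : PySem.List.pyGet? l v = some w) :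
    PySem.Raise.InRange l.length v := by
  unfold PySem.List.pyGet? at h
  cases hq : PySem.List.pyIdx? l.length v with
  | none => rw [hq] at h; simp at h
  | some q => exact pv_pyIdx?_some hq

lemma pv_exch_some {l r : List String} {a b : Int}
    (h : pvApplyOp l (.exch a b) = some r) :
    ∃ va vb, PySem.List.pyGet? l a = some va ∧ PySem.List.pyGet? l b = some vb ∧
      r = (l.set (pvNorm l.length a) vb).set (pvNorm l.length b) va := by
  simp only [pvApplyOp] at h
  cases hgb : PySem.List.pyGet? l b with
  | none => rw [hgb] at h; simp at h
  | some vb =>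
    cases hga : PySem.List.pyGet? l a with
    | none => rw [hgb, hga] at h; simp at h
    | some va =>
      rw [hgb, hga] at h
      simp only at h
      have hra : PySem.Raise.InRange l.length a := pv_pyGet?_some hga
      have hrb : PySem.Raise.InRange l.length b := pv_pyGet?_some hgb
      rw [pv_pySet?_norm l a vb hra] at h
      have hlen : (l.set (pvNorm l.length a) vb).length = l.length := by simp
      have hrb' : PySem.Raise.InRange (l.set (pvNorm l.length a) vb).length b := by
        rw [hlen]; exact hrb
      simp only at h
      rw [pv_pySet?_norm _ b va hrb'] at h
      rw [hlen] at h
      exact ⟨va, vb, rfl, rfl, (Option.some_inj.mp h).symm⟩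

lemma pv_applyOp_length (op : PvOp) (l r : List String) (h : pvApplyOp l op = some r) :
    r.length = l.length := by
  cases op with
  | spin x =>
    simp only [pvApplyOp] at h
    rw [pv_slice_spin] at h
    have hc := PySem.List.clampIdx_le (n := l.length) (i := -x)
    rw [← Option.some_inj.mp h]
    exact pv_rot_length l _ hc
  | exch a b =>
    obtain ⟨va, vb, _, _, rfl⟩ := pv_exch_some h
    simp
  | part a b =>
    simp only [pvApplyOp] at h
    rw [← Option.some_inj.mp h]
    simp

lemma pv_getElem_of_pyGet? {α : Type} {l : List α} {v : Int} {w : α}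
    (h : PySem.List.pyGet? l v = some w) :
    ∃ hlt : pvNorm l.length v < l.length, l[pvNorm l.length v]'hlt = w := by
  have hr := pv_pyGet?_some h
  rw [pv_pyGet?_norm l v hr] at h
  exact List.getElem?_eq_some_iff.mp h

lemma pv_applyOp_inj (op : PvOp) (l1 l2 r : List String) (hlen : l1.length = l2.length)
    (h1 : pvApplyOp l1 op = some r) (h2 : pvApplyOp l2 op = some r) : l1 = l2 := by
  cases op with
  | spin x =>
    simp only [pvApplyOp] at h1 h2
    rw [pv_slice_spin] at h1 h2
    have hc1 := PySem.List.clampIdx_le (n := l1.length) (i := -x)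
    have hc2 := PySem.List.clampIdx_le (n := l2.length) (i := -x)
    have hr : pvRot l1 (PySem.List.clampIdx l1.length (-x))
        = pvRot l2 (PySem.List.clampIdx l2.length (-x)) := by
      rw [Option.some_inj.mp h1, Option.some_inj.mp h2]
    have hj : PySem.List.clampIdx l1.length (-x) = PySem.List.clampIdx l2.length (-x) := by
      rw [hlen]
    calc l1 = pvRot (pvRot l1 (PySem.List.clampIdx l1.length (-x)))
              (l1.length - PySem.List.clampIdx l1.length (-x)) := (pv_rot_rot l1 _ hc1).symm
      _ = pvRot (pvRot l2 (PySem.List.clampIdx l2.length (-x)))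
              (l2.length - PySem.List.clampIdx l2.length (-x)) := by rw [hr, hj, hlen]
      _ = l2 := pv_rot_rot l2 _ hc2
  | exch a b =>
    obtain ⟨va1, vb1, hga1, hgb1, he1⟩ := pv_exch_some h1
    obtain ⟨va2, vb2, hga2, hgb2, he2⟩ := pv_exch_some h2
    obtain ⟨hqa1, hva1⟩ := pv_getElem_of_pyGet? hga1
    obtain ⟨hqb1, hvb1⟩ := pv_getElem_of_pyGet? hgb1
    obtain ⟨hqa2, hva2⟩ := pv_getElem_of_pyGet? hga2
    obtain ⟨hqb2, hvb2⟩ := pv_getElem_of_pyGet? hgb2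
    have hna : pvNorm l1.length a = pvNorm l2.length a := by rw [hlen]
    have hnb : pvNorm l1.length b = pvNorm l2.length b := by rw [hlen]
    have hre : (l1.set (pvNorm l1.length a) vb1).set (pvNorm l1.length b) va1
             = (l2.set (pvNorm l2.length a) vb2).set (pvNorm l2.length b) va2 := by
      rw [← he1, ← he2]
    have hev : ∀ j, j < l2.length →
        ((if pvNorm l1.length b = j then some va1 else if pvNorm l1.length a = j then some vb1 else l1[j]?)
       = (if pvNorm l2.length b = j then some va2 else if pvNorm l2.length a = j then some vb2 else l2[j]?)) := by
      intro j hj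
      have hc := congrArg (fun t => t[j]?) hre
      simp only [List.getElem?_set, List.length_set] at hc
      rw [if_pos (by omega : pvNorm l1.length b < l1.length)] at hc
      rw [if_pos (by omega : pvNorm l1.length a < l1.length)] at hc
      rw [if_pos hqb2, if_pos hqa2] at hc
      exact hc
    have hva : va1 = va2 := by
      have hc := hev (pvNorm l2.length b) hqb2
      rw [if_pos hnb, if_pos rfl] at hc
      exact Option.some_inj.mp hc
    have hvb : vb1 = vb2 := by
      by_cases hq : pvNorm l2.length a = pvNorm l2.length b
      · have e1 : vb1 = va1 := by
          rw [← hva1, ← hvb1]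
          congr 1
          omega
        have e2 : vb2 = va2 := by
          rw [← hva2, ← hvb2]
          congr 1
          omega
        rw [e1, e2, hva]
      · have hc := hev (pvNorm l2.length a) hqa2
        rw [if_neg (by omega : ¬ pvNorm l1.length b = pvNorm l2.length a)] at hc
        rw [if_pos hna, if_neg (fun h => hq h.symm), if_pos rfl] at hc
        exact Option.some_inj.mp hc
    apply List.ext_getElem hlen
    intro i hi1 hi2
    by_cases hib : i = pvNorm l2.length b
    · subst hib
      have e1 : l1[pvNorm l2.length b]'hi1 = vb1 := by rw [← hvb1]; congr 1; omega
      rw [e1, hvb, hvb2]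
    · by_cases hia : i = pvNorm l2.length a
      · subst hia
        have e1 : l1[pvNorm l2.length a]'hi1 = va1 := by rw [← hva1]; congr 1; omega
        rw [e1, hva, hva2]
      · have hc := hev i hi2
        rw [if_neg (by omega), if_neg (by omega), if_neg (by omega), if_neg (by omega)] at hc
        have g1 : l1[i]? = some (l1[i]'hi1) := List.getElem?_eq_getElem hi1
        have g2 : l2[i]? = some (l2[i]'hi2) := List.getElem?_eq_getElem hi2
        rw [g1, g2] at hc
        exact Option.some_inj.mp hc
  | part a b =>
    simp only [pvApplyOp] at h1 h2
    have hf : Function.Involutive (fun d => if d == a then b else if d == b then a else d) := by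
      intro d
      by_cases hda : d = a
      · subst hda
        by_cases hba : b = d <;> simp_all [beq_iff_eq]
      · by_cases hdb : d = b
        · subst hdb
          simp [beq_iff_eq, hda]
        · simp [beq_iff_eq, hda, hdb]
    have h3 : l1.map (fun d => if d == a then b else if d == b then a else d)
        = l2.map (fun d => if d == a then b else if d == b then a else d) := by
      rw [Option.some_inj.mp h1, Option.some_inj.mp h2]
    have hthis := congrArg (List.map (fun d => if d == a then b else if d == b then a else d)) h3
    rw [List.map_map, List.map_map, Function.Involutive.comp_self hf, List.map_id, List.map_id] at hthis
    exact hthis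

lemma pv_danceB_inj (ops : List PvOp) : ∀ (l1 l2 r : List String), l1.length = l2.length →
    pvDanceB ops l1 = some r → pvDanceB ops l2 = some r → l1 = l2 := by
  induction ops with
  | nil => intro l1 l2 r _ h1 h2; simp [pvDanceB] at h1 h2; rw [h1, h2]
  | cons op ops ih =>
    intro l1 l2 r hlen h1 h2
    rw [pv_danceB_cons] at h1 h2
    cases hc1 : pvApplyOp l1 op with
    | none => rw [hc1] at h1; simp at h1
    | some c1 =>
      cases hc2 : pvApplyOp l2 op with
      | none => rw [hc2] at h2; simp at h2
      | some c2 =>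
        rw [hc1] at h1; rw [hc2] at h2
        simp only at h1 h2
        have hclen : c1.length = c2.length := by
          rw [pv_applyOp_length op l1 c1 hc1, pv_applyOp_length op l2 c2 hc2, hlen]
        have : c1 = c2 := ih c1 c2 r hclen h1 h2
        subst this
        exact pv_applyOp_inj op l1 l2 c1 hlen hc1 hc2

-- ---- join is injective on lists of single-character strings ----
lemma pv_flatten_singletons_inj : ∀ (xs ys : List (List Char)),
    (∀ u ∈ xs, u.length = 1) → (∀ u ∈ ys, u.length = 1) →
    xs.flatten = ys.flatten → xs = ys := by
  intro xs
  induction xs with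
  | nil =>
    intro ys _ hy h
    cases ys with
    | nil => rfl
    | cons v ys =>
      exfalso
      have hv : v.length = 1 := hy v (by simp)
      obtain ⟨e, rfl⟩ : ∃ e, v = [e] := by
        cases v with
        | nil => simp at hv
        | cons e t => cases t with
          | nil => exact ⟨e, rfl⟩
          | cons _ _ => simp at hv
      simp at h
  | cons u xs ih =>
    intro ys hx hy h
    cases ys with
    | nil =>
      exfalso
      have hu : u.length = 1 := hx u (by simp)
      obtain ⟨e, rfl⟩ : ∃ e, u = [e] := by
        cases u with
        | nil => simp at hu
        | cons e t => cases t with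
          | nil => exact ⟨e, rfl⟩
          | cons _ _ => simp at hu
      simp at h
    | cons v ys =>
      have hu : u.length = 1 := hx u (by simp)
      have hv : v.length = 1 := hy v (by simp)
      obtain ⟨c, hc⟩ : ∃ c, u = [c] := by
        cases u with
        | nil => simp at hu
        | cons c t => cases t with
          | nil => exact ⟨c, rfl⟩
          | cons _ _ => simp at hu
      obtain ⟨e, he⟩ : ∃ e, v = [e] := by
        cases v with
        | nil => simp at hv
        | cons e t => cases t with
          | nil => exact ⟨e, rfl⟩
          | cons _ _ => simp at hv
      subst hc he
      simp only [List.flatten_cons, List.singleton_append, List.cons.injEq] at h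
      obtain ⟨rfl, ht⟩ := h
      rw [ih ys (fun w hw => hx w (by simp [hw])) (fun w hw => hy w (by simp [hw])) ht]

lemma pv_join_inj (l1 l2 : List String)
    (h1 : ∀ s ∈ l1, s.toList.length = 1) (h2 : ∀ s ∈ l2, s.toList.length = 1)
    (h : PySem.Str.join "" l1 = PySem.Str.join "" l2) : l1 = l2 := by
  have ht := congrArg String.toList h
  rw [PySem.Str.toList_join, PySem.Str.toList_join] at ht
  have hint : ∀ (xs : List (List Char)), List.intercalate ([] : List Char) xs = xs.flatten := by
    intro xs
    unfold List.intercalate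
    induction xs with
    | nil => rfl
    | cons u xs ih =>
      cases xs with
      | nil => simp
      | cons w xs => simp_all [List.intersperse]
  simp only [PySem.Chars.join, show ("" : String).toList = ([] : List Char) from rfl, hint] at ht
  have hfl := pv_flatten_singletons_inj (l1.map String.toList) (l2.map String.toList)
    (by intro u hu; obtain ⟨s, hs, rfl⟩ := List.mem_map.mp hu; exact h1 s hs)
    (by intro u hu; obtain ⟨s, hs, rfl⟩ := List.mem_map.mp hu; exact h2 s hs) ht
  have hinj : Function.Injective String.toList := by
    intro s t hst
    have hof : String.ofList s.toList = String.ofList t.toList := by rw [hst]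
    simpa using hof
  exact List.map_injective_iff.mpr hinj hfl

-- ---- the iterated dance ----
lemma pv_iter_facts (dancers moves : List String) (hnd : dancers.Nodup)
    (hOk : ∀ m ∈ moves, pvMoveOk dancers.length dancers m = true)
    (ops : List PvOp) (hops : pvParse moves = some ops) :
    ∀ k : Nat, (pvIter ops dancers k).Perm dancers ∧
      pvDanceB ops (pvIter ops dancers k) = some (pvIter ops dancers (k + 1)) ∧
      pvDoDance moves (pvIter ops dancers k) = some (pvIter ops dancers (k + 1)) := by
  have hperm : ∀ k : Nat, (pvIter ops dancers k).Perm dancers := by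
    intro k
    induction k with
    | zero => exact List.Perm.refl _
    | succ k ihk =>
      obtain ⟨l', _, hdb, hG'⟩ := pv_doDance_agree dancers moves hnd hOk ops hops _ ihk
      have he : pvIter ops dancers (k + 1) = l' := by
        show (pvDanceB ops (pvIter ops dancers k)).getD [] = l'
        rw [hdb]
        rfl
      rw [he]
      exact hG'
  intro k
  obtain ⟨l', hdo, hdb, _⟩ := pv_doDance_agree dancers moves hnd hOk ops hops _ (hperm k)
  have he : pvIter ops dancers (k + 1) = l' := by
    show (pvDanceB ops (pvIter ops dancers k)).getD [] = l'
    rw [hdb]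
    rfl
  rw [he]
  exact ⟨hperm k, hdb, hdo⟩

lemma pv_iter_descend (dancers moves : List String) (hnd : dancers.Nodup)
    (hOk : ∀ m ∈ moves, pvMoveOk dancers.length dancers m = true)
    (ops : List PvOp) (hops : pvParse moves = some ops) :
    ∀ p q : Nat, p ≤ q → pvIter ops dancers p = pvIter ops dancers q →
      pvIter ops dancers 0 = pvIter ops dancers (q - p) := by
  intro p
  induction p with
  | zero =>
    intro q _ h
    simpa using h
  | succ p ihp =>
    intro q hpq h
    cases q with
    | zero => omega
    | succ q' =>
      have h1 := (pv_iter_facts dancers moves hnd hOk ops hops p).2.1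
      have h2 := (pv_iter_facts dancers moves hnd hOk ops hops q').2.1
      rw [← h] at h2
      have hlen : (pvIter ops dancers p).length = (pvIter ops dancers q').length := by
        rw [(pv_iter_facts dancers moves hnd hOk ops hops p).1.length_eq,
          (pv_iter_facts dancers moves hnd hOk ops hops q').1.length_eq]
      have := pv_danceB_inj ops _ _ _ hlen h1 h2
      have hres := ihp q' (by omega) this
      simpa using hres

-- ---- moves that touch nothing ----
lemma pv_noop_move (nn : Nat) (names : List String) (m : String)
    (hm : pvMoveOk nn names m = true) (hne : pvEffective m = false) :
    pvParseOne m = some none ∧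
      ∀ (nI : Int) (l : List String) (dp : PySem.Dict String Int),
        pvStepA nI (some (l, dp)) m = some (l, dp) := by
  simp only [pvMoveOk] at hm
  cases hc0 : PySem.Str.pyGet? m 0 with
  | none => rw [hc0] at hm; simp at hm
  | some c =>
    simp only [pvEffective, hc0, Bool.or_eq_false_iff] at hne
    obtain ⟨⟨hs, hx⟩, hp⟩ := hne
    constructor
    · unfold pvParseOne
      rw [hc0]
      dsimp only
      rw [if_neg (by simp [hs]), if_neg (by simp [hx]), if_neg (by simp [hp])]
    · intro nI l dp
      unfold pvStepA
      rw [hc0]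
      dsimp only
      rw [if_neg (by simp [hs]), if_neg (by simp [hx]), if_neg (by simp [hp])]

lemma pv_noop_parse_all : ∀ (moves : List String),
    (∀ m ∈ moves, pvParseOne m = some none) → pvParse moves = some [] := by
  intro moves
  induction moves with
  | nil => intro _; rfl
  | cons m ms ih =>
    intro h
    simp only [pvParse, List.foldl_cons, Option.bind_some]
    rw [h m (by simp)]
    simp only [Option.map_some]
    exact ih (fun m hm => h m (by simp [hm]))

lemma pv_noop_fold : ∀ (moves : List String),
    (∀ m ∈ moves, ∀ (nI : Int) (l : List String) (dp : PySem.Dict String Int),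
      pvStepA nI (some (l, dp)) m = some (l, dp)) →
    ∀ (nI : Int) (l : List String) (dp : PySem.Dict String Int),
      moves.foldl (pvStepA nI) (some (l, dp)) = some (l, dp) := by
  intro moves
  induction moves with
  | nil => intro _ nI l dp; rfl
  | cons m ms ih =>
    intro h nI l dp
    simp only [List.foldl_cons]
    rw [h m (by simp)]
    exact ih (fun m hm => h m (by simp [hm])) nI l dp

-- ---- the outer loops ----
lemma pv_loop_agree (dancers moves : List String)
    (hnd : dancers.Nodup) (h1 : ∀ d ∈ dancers, d.toList.length = 1)
    (hOk : ∀ m ∈ moves, pvMoveOk dancers.length dancers m = true)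
    (ops : List PvOp) (hops : pvParse moves = some ops) :
    ∀ d k : Nat, k + d = 5460 →
      (∀ j : Nat, 1 ≤ j → j ≤ k → pvIter ops dancers j ≠ dancers) →
      pvLoopA moves (PySem.List.pyRange (1 + (k : Int)) 5461 1) (pvIter ops dancers k)
          (PySem.Set.ofList ((List.range (k + 1)).map
            (fun j => PySem.Str.join "" (pvIter ops dancers j))))
        = pvLoopB ops dancers (PySem.List.pyRange (1 + (k : Int)) 5461 1) (pvIter ops dancers k) := by
  intro d
  induction d with
  | zero =>
    intro k hk _
    have hk' : k = 5460 := by omega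
    subst hk'
    rw [PySem.List.pyRange_one_eq_nil (by norm_num)]
    rfl
  | succ d ihd =>
    intro k hk hnohit
    have hcons : PySem.List.pyRange (1 + (k : Int)) 5461 1
        = (1 + (k : Int)) :: PySem.List.pyRange ((1 + (k : Int)) + 1) 5461 1 :=
      PySem.List.pyRange_one_cons (by push_cast; omega)
    rw [hcons]
    obtain ⟨hGk, hdb1, hdo1⟩ := pv_iter_facts dancers moves hnd hOk ops hops k
    simp only [pvLoopA, pvLoopB]
    rw [hdo1, hdb1]
    dsimp only
    have hlen1' : ∀ j : Nat, ∀ s ∈ pvIter ops dancers j, s.toList.length = 1 := by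
      intro j t ht
      exact h1 t ((pv_iter_facts dancers moves hnd hOk ops hops j).1.subset ht)
    have hiff : (PySem.Set.contains
        (PySem.Set.ofList ((List.range (k + 1)).map
          (fun j => PySem.Str.join "" (pvIter ops dancers j))))
        (PySem.Str.join "" (pvIter ops dancers (k + 1))) = true)
        ↔ pvIter ops dancers (k + 1) = dancers := by
      constructor
      · intro hc
        have hmem := (PySem.Set.contains_iff _ _).mp hc
        rw [PySem.Set.mem_ofList] at hmem
        obtain ⟨j, hj, hjoin⟩ := List.mem_map.mp hmem
        have hjlt : j < k + 1 := List.mem_range.mp hj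
        have hstate : pvIter ops dancers j = pvIter ops dancers (k + 1) :=
          pv_join_inj _ _ (hlen1' j) (hlen1' (k + 1)) hjoin
        rcases Nat.eq_zero_or_pos j with rfl | hjpos
        · exact hstate.symm
        · exfalso
          have hdesc := pv_iter_descend dancers moves hnd hOk ops hops j (k + 1)
            (by omega) hstate
          exact hnohit (k + 1 - j) (by omega) (by omega) hdesc.symm
      · intro hh
        apply (PySem.Set.contains_iff _ _).mpr
        rw [PySem.Set.mem_ofList]
        apply List.mem_map.mpr
        refine ⟨0, List.mem_range.mpr (by omega), ?_⟩
        show PySem.Str.join "" (pvIter ops dancers 0) = PySem.Str.join "" (pvIter ops dancers (k + 1))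
        rw [hh]
        rfl
    by_cases hhit : pvIter ops dancers (k + 1) = dancers
    · rw [if_pos (hiff.mpr hhit), if_pos (by simp [hhit])]
    · rw [if_neg (fun hc => hhit (hiff.mp hc)), if_neg (by simp [hhit])]
      have hseen' : PySem.Set.add
          (PySem.Set.ofList ((List.range (k + 1)).map
            (fun j => PySem.Str.join "" (pvIter ops dancers j))))
          (PySem.Str.join "" (pvIter ops dancers (k + 1)))
          = PySem.Set.ofList ((List.range (k + 1 + 1)).map
            (fun j => PySem.Str.join "" (pvIter ops dancers j))) := by
        conv_rhs => rw [List.range_succ]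
        rw [List.map_append]
        simp only [List.map_cons, List.map_nil]
        rw [PySem.Set.ofList_append_singleton]
      rw [hseen']
      have harith : (1 + (k : Int)) + 1 = 1 + ((k + 1 : Nat) : Int) := by push_cast; ring
      rw [harith]
      exact ihd (k + 1) (by omega) (by
        intro j hj1 hj2
        rcases Nat.lt_or_ge j (k + 1) with hlt | hge
        · exact hnohit j hj1 (by omega)
        · have : j = k + 1 := by omega
          rw [this]
          exact hhit)

-- ===== VERDICT (by name: the statement is the Claim_ definition above) =====
theorem findCycleLen_spec : Claim_equal_findCycleLen := by
  intro moves dancers _ hpre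
  obtain ⟨hOk, hnames⟩ := hpre
  unfold Spec_findCycleLen
  by_cases hEff : ∃ m ∈ moves, pvEffective m = true
  case neg =>
    -- every move is ignored by both programs: both report a cycle of length 1
    have hall : ∀ m ∈ moves, pvEffective m = false := by
      intro m hm
      by_contra h
      exact hEff ⟨m, hm, by simpa using h⟩
    have hnoop := fun m hm => pv_noop_move dancers.length dancers m (hOk m hm) (hall m hm)
    have hparse : pvParse moves = some [] :=
      pv_noop_parse_all moves (fun m hm => (hnoop m hm).1)
    have hdo : pvDoDance moves dancers = some dancers := by
      unfold pvDoDance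
      rw [pv_noop_fold moves (fun m hm => (hnoop m hm).2)]
      rfl
    unfold findCycleLen findCycleLen_alt
    rw [hparse]
    rw [PySem.List.pyRange_one_cons (by norm_num : (1:Int) < 5461)]
    simp only [pvLoopA, pvLoopB]
    rw [hdo]
    dsimp only
    rw [if_pos (by
      simp [PySem.Set.add, PySem.Set.contains, PySem.Set.empty])]
    rw [show pvDanceB [] dancers = some dancers from rfl]
    dsimp only
    rw [if_pos (by simp)]
  case pos =>
  obtain ⟨hnd, h1⟩ := hnames hEff
  obtain ⟨l0, dp0, ops, hops, -, -, -, -⟩ :=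
    pv_dance_agree dancers hnd moves hOk dancers (pvBuildPos dancers) (List.Perm.refl _)
      (pv_inv_build dancers hnd)
  unfold findCycleLen findCycleLen_alt
  rw [hops]
  have hstart : PySem.Set.add PySem.Set.empty (PySem.Str.join "" dancers)
      = PySem.Set.ofList ((List.range (0 + 1)).map
        (fun j => PySem.Str.join "" (pvIter ops dancers j))) := rfl
  have hrange : PySem.List.pyRange 1 5461 1 = PySem.List.pyRange (1 + ((0 : Nat) : Int)) 5461 1 := by
    norm_num
  rw [hstart, hrange]
  exact pv_loop_agree dancers moves hnd h1 hOk ops hops 5460 0 (by omega)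
    (fun j hj1 hj2 => by omega)
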